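-- pv_equiv track=rewrite | github.com/LittleOstrich/HelpersLibary | helpers/modelEvalTools.py | splitConfusionLabels
-- ===== SOURCE A (Python) =====
-- def splitConfusionLabels(confusionLabels):
--     TP, FP, FN, TN = 0, 0, 0, 0
--
--     N = len(confusionLabels)
--     for i in range(N):
--         lbl = confusionLabels[i]
--         if lbl == "TP":
--             TP = TP + 1
--         elif lbl == "FP":
--             FP = FP + 1
--         elif lbl == "FN":
--             FN = FN + 1
--         elif lbl == "TN":
--             TN = TN + 1
--         else:
--             assert False
--     return TP, FP, FN, TN
-- ===== SOURCE B (Python) =====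
-- def splitConfusionLabels(confusionLabels):
--     TP = confusionLabels.count("TP")
--     FP = confusionLabels.count("FP")
--     FN = confusionLabels.count("FN")
--     TN = confusionLabels.count("TN")
--     assert TP + FP + FN + TN == len(confusionLabels)
--     return TP, FP, FN, TN
-- ===== Notes on version B (the rewrite author's own statement) =====
-- stated objective: idiomatic
-- what changed: Replaces the interleaved index loop with branch-per-label accumulators by four independent list.count scans plus a sum-equals-length assertion that rejects foreign labels exactly where A's else-branch asserts.
import Mathlib
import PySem

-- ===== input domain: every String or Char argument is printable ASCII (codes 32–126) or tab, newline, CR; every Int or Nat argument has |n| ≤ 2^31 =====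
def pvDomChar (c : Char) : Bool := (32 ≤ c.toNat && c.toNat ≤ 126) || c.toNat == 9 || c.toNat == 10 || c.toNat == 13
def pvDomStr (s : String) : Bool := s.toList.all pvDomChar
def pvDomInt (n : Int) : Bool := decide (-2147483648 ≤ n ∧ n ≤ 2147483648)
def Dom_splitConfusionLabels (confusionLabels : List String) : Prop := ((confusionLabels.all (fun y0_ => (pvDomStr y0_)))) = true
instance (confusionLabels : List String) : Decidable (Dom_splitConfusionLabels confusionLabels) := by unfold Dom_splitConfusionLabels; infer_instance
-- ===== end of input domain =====

-- B replaces A's interleaved validating index loop with four independent .count scans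
-- plus a sum-equals-length assertion (idiomatic; same behaviour including the AssertionError).


-- ===== PORT A =====
-- A's for-i loop over the labels, accumulating the quadruple; the else branch is
-- 'assert False' (A raises there; those inputs are outside Pre_, the fold leaves the state unchanged).
def splitConfusionLabelsStep (s : Int × Int × Int × Int) (lbl : String) : Int × Int × Int × Int :=
  let (tp, fp, fn, tn) := s
  if lbl == "TP" then (tp + 1, fp, fn, tn)
  else if lbl == "FP" then (tp, fp + 1, fn, tn)
  else if lbl == "FN" then (tp, fp, fn + 1, tn)
  else if lbl == "TN" then (tp, fp, fn, tn + 1)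
  else s

def splitConfusionLabels (confusionLabels : List String) : Int × Int × Int × Int :=
  confusionLabels.foldl splitConfusionLabelsStep (0, 0, 0, 0)

-- ===== PORT B =====
-- four independent count scans; B's assert (sum == len) always holds inside Pre_
def splitConfusionLabels_alt (confusionLabels : List String) : Int × Int × Int × Int :=
  ((PySem.List.count confusionLabels "TP" : Int),
   (PySem.List.count confusionLabels "FP" : Int),
   (PySem.List.count confusionLabels "FN" : Int),
   (PySem.List.count confusionLabels "TN" : Int))

-- ===== PRECONDITION & SPEC =====
-- Pre_ excludes labels other than the four, on which both A and B raise AssertionError.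
def Pre_splitConfusionLabels (confusionLabels : List String) : Prop :=
  (confusionLabels.all fun lbl =>
    lbl.toList == "TP".toList || lbl.toList == "FP".toList ||
    lbl.toList == "FN".toList || lbl.toList == "TN".toList) = true
instance (confusionLabels : List String) : Decidable (Pre_splitConfusionLabels confusionLabels) := by unfold Pre_splitConfusionLabels; infer_instance
def pvWitness_splitConfusionLabels : List String := ["TP", "FN", "TP", "TN", "FP"]

def Spec_splitConfusionLabels (confusionLabels : List String) (out : Int × Int × Int × Int) : Prop := out = splitConfusionLabels_alt confusionLabels
instance (confusionLabels : List String) (out : Int × Int × Int × Int) : Decidable (Spec_splitConfusionLabels confusionLabels out) := by unfold Spec_splitConfusionLabels; infer_instance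

-- ===== CLAIM (what is proved, stated in full; the proofs are below) =====
def Claim_equal_splitConfusionLabels : Prop := ∀ (confusionLabels : List String), Dom_splitConfusionLabels confusionLabels → Pre_splitConfusionLabels confusionLabels → Spec_splitConfusionLabels confusionLabels (splitConfusionLabels confusionLabels)

-- ===== LEMMAS AND PROOFS =====

-- A's fold, started at an arbitrary state, adds each label's count componentwise.
theorem splitConfusionLabels_foldl_eq (l : List String)
    (h : ∀ lbl ∈ l, lbl = "TP" ∨ lbl = "FP" ∨ lbl = "FN" ∨ lbl = "TN")
    (tp fp fn tn : Int) :
    l.foldl splitConfusionLabelsStep (tp, fp, fn, tn)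
    = (tp + (l.count "TP" : Int), fp + (l.count "FP" : Int),
       fn + (l.count "FN" : Int), tn + (l.count "TN" : Int)) := by
  induction l generalizing tp fp fn tn with
  | nil => simp
  | cons x xs ih =>
    have hx := h x (List.mem_cons_self)
    have hxs : ∀ lbl ∈ xs, lbl = "TP" ∨ lbl = "FP" ∨ lbl = "FN" ∨ lbl = "TN" :=
      fun lbl hm => h lbl (List.mem_cons_of_mem _ hm)
    rcases hx with h1 | h1 | h1 | h1 <;> subst h1
    · rw [List.foldl_cons,
          show splitConfusionLabelsStep (tp, fp, fn, tn) "TP" = (tp + 1, fp, fn, tn) from rfl,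
          ih hxs]
      simp; omega
    · rw [List.foldl_cons,
          show splitConfusionLabelsStep (tp, fp, fn, tn) "FP" = (tp, fp + 1, fn, tn) from rfl,
          ih hxs]
      simp; omega
    · rw [List.foldl_cons,
          show splitConfusionLabelsStep (tp, fp, fn, tn) "FN" = (tp, fp, fn + 1, tn) from rfl,
          ih hxs]
      simp; omega
    · rw [List.foldl_cons,
          show splitConfusionLabelsStep (tp, fp, fn, tn) "TN" = (tp, fp, fn, tn + 1) from rfl,
          ih hxs]
      simp; omega

-- ===== VERDICT (by name: the statement is the Claim_ definition above) =====
theorem splitConfusionLabels_spec : Claim_equal_splitConfusionLabels := by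
  intro l _ hpre
  unfold Pre_splitConfusionLabels at hpre
  have hpre' : ∀ lbl ∈ l, lbl = "TP" ∨ lbl = "FP" ∨ lbl = "FN" ∨ lbl = "TN" := by
    intro lbl hm
    have := List.all_eq_true.mp hpre lbl hm
    simp only [Bool.or_eq_true, beq_iff_eq, String.toList_inj] at this
    tauto
  unfold Spec_splitConfusionLabels splitConfusionLabels splitConfusionLabels_alt
  rw [splitConfusionLabels_foldl_eq l hpre']
  simp [PySem.List.count_eq]
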